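-- pv_equiv track=rewrite | github.com/thcborges/CompCEDERJ-FP | ADs-2016.2/AD2/AD2Q1.py | pegaUltimo
-- ===== SOURCE A (Python) =====
-- def car(lis):
--     return lis[0]
--
-- def cdr(lis):
--     return lis[1:]
--
-- def pegaUltimo(lista):
--     if lista == []:
--         return None
--     else:
--         if cdr(lista) == []:
--             return car(lista)
--         else:
--             return pegaUltimo(cdr(lista))
-- ===== SOURCE B (Python) =====
-- def pegaUltimo(lista):
--     ultimo = None
--     for x in lista:
--         ultimo = x
--     return ultimo
-- ===== Notes on version B (the rewrite author's own statement) =====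
-- stated objective: faster
-- what changed: Replaced the cdr-slicing tail recursion with a single iterative forward pass keeping the last seen element in an accumulator.
import Mathlib
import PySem

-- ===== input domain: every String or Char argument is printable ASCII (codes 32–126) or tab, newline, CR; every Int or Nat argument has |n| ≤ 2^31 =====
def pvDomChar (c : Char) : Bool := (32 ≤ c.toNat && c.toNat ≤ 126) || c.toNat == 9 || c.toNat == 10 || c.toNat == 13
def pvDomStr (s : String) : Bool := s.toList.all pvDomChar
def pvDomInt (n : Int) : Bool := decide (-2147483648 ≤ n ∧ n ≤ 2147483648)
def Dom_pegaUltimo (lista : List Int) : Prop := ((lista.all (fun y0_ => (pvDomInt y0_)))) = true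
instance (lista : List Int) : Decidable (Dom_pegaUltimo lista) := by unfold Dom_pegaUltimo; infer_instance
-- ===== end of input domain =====

-- B replaces A's cdr-slicing recursion with a single iterative pass (simpler).


-- ===== PORT A =====
-- A: recursion; cdr(lista) = lista[1:] is the tail, car(lista) = lista[0] the head.
def pegaUltimo : List Int → Option Int
  | [] => none
  | x :: xs => if xs = [] then some x else pegaUltimo xs

-- ===== PORT B =====
-- B: one forward pass, `ultimo = None; for x in lista: ultimo = x; return ultimo`.
def pegaUltimo_alt (lista : List Int) : Option Int :=
  lista.foldl (fun _ x => some x) none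

-- ===== PRECONDITION & SPEC =====
def Spec_pegaUltimo (lista : List Int) (out : Option Int) : Prop := out = pegaUltimo_alt lista
instance (lista : List Int) (out : Option Int) : Decidable (Spec_pegaUltimo lista out) := by unfold Spec_pegaUltimo; infer_instance

-- ===== CLAIM (what is proved, stated in full; the proofs are below) =====
def Claim_equal_pegaUltimo : Prop := ∀ (lista : List Int), Dom_pegaUltimo lista → Spec_pegaUltimo lista (pegaUltimo lista)

-- ===== LEMMAS AND PROOFS =====

-- ===== VERDICT (by name: the statement is the Claim_ definition above) =====
theorem pegaUltimo_eq_alt (lista : List Int) : pegaUltimo lista = pegaUltimo_alt lista := by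
  induction lista with
  | nil => rfl
  | cons x xs ih =>
    cases xs with
    | nil => rfl
    | cons y ys =>
      have hA : pegaUltimo (x :: y :: ys) = pegaUltimo (y :: ys) := by
        simp [pegaUltimo]
      have hB : pegaUltimo_alt (x :: y :: ys) = pegaUltimo_alt (y :: ys) := by
        simp [pegaUltimo_alt, List.foldl]
      rw [hA, hB, ih]

theorem pegaUltimo_spec : Claim_equal_pegaUltimo := by
  intro lista _
  unfold Spec_pegaUltimo
  exact pegaUltimo_eq_alt lista
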